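-- pv_equiv track=rewrite | github.com/martinfalke/aoc2023 | 04/day04.py | get_card_num_winners
-- ===== SOURCE A (Python) =====
-- def get_card_num_winners(card_winners, card_candidates):
--     num_winners = 0  # winners on current card
--     for j in range(len(card_candidates)):
--         candidate_number = card_candidates[j]
--         for k in range(len(card_winners)):
--             winning_number = card_winners[k]
--             if candidate_number < winning_number:
--                 # lists are sorted in ascending order, hence the number can't
--                 # be a winning if it's reached a winner that's greater than itself
--                 break
--             if candidate_number == winning_number:
--                 num_winners += 1
--     return num_winners
-- ===== SOURCE B (Python) =====
-- def get_card_num_winners(card_winners, card_candidates):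
--     counts = {}
--     for w in card_winners:
--         counts[w] = counts.get(w, 0) + 1
--     return sum(counts.get(c, 0) for c in card_candidates)
-- ===== Notes on version B (the rewrite author's own statement) =====
-- stated objective: simpler
-- what changed: Replaces the nested per-candidate scan-with-break by a frequency table built in one pass over the winners and a single summing pass over the candidates.
-- intended difference: On inputs where some candidate equals a winner that appears after a strictly larger winner (i.e. the winners list is not sorted ascending as A's break assumes), A undercounts those matches because its break stops the scan early, while B returns the full pair count, which is the intended 'count candidates present in winners' value. — e.g. on get_card_num_winners([2, 1], [1]): A returns 0, B returns 1
import Mathlib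
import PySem

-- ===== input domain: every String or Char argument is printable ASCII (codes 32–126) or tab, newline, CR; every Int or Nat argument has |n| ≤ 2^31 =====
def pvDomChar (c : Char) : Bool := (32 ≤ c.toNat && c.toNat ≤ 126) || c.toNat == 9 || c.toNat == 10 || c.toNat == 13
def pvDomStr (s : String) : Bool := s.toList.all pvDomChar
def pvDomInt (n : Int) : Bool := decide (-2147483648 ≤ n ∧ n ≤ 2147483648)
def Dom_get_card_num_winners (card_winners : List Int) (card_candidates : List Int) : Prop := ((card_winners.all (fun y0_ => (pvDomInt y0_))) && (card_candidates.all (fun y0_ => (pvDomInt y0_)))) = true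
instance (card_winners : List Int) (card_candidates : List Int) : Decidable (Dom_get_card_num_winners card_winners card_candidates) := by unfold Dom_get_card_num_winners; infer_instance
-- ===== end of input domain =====

-- B builds a frequency table of the winners in one pass and sums the candidates'
-- multiplicities in a second pass; it differs from A exactly where A's early break
-- (which assumes a sorted winners list) hides a matching winner (see D_ below).

-- ===== PORT A =====
-- inner `for k` loop of A: scan winners, break at the first winner greater than c
def pvInnerA (card_winners : List Int) (c : Int) : Int :=
  match card_winners with
  | [] => 0
  | w :: ws =>
    if c < w then 0
    else if c == w then 1 + pvInnerA ws c
    else pvInnerA ws c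

def get_card_num_winners (card_winners : List Int) (card_candidates : List Int) : Int :=
  card_candidates.foldl (fun num_winners c => num_winners + pvInnerA card_winners c) 0

-- ===== PORT B =====
def get_card_num_winners_alt (card_winners : List Int) (card_candidates : List Int) : Int :=
  let counts : PySem.Dict Int Int :=
    card_winners.foldl (fun d w => d.insert w (d.getD w 0 + 1)) PySem.Dict.empty
  card_candidates.foldl (fun total c => total + counts.getD c 0) 0

-- ===== PRECONDITION & SPEC =====
-- On inputs where some candidate equals a winner preceded by a strictly larger winner
-- (the winners list violating the sortedness A's break assumes), A undercounts the
-- matches; B returns the full pair count, the intended value.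
-- hiddenTo ws c: some occurrence of c in ws is preceded by an element > c
def hiddenTo (ws : List Int) (c : Int) : Bool :=
  match ws with
  | [] => false
  | w :: ws => (c < w && ws.contains c) || hiddenTo ws c

def D_get_card_num_winners (card_winners : List Int) (card_candidates : List Int) : Prop :=
  ∃ c ∈ card_candidates, hiddenTo card_winners c = true
instance (card_winners : List Int) (card_candidates : List Int) : Decidable (D_get_card_num_winners card_winners card_candidates) := by unfold D_get_card_num_winners; infer_instance

def Spec_get_card_num_winners (card_winners : List Int) (card_candidates : List Int) (out : Int) : Prop := ¬ D_get_card_num_winners card_winners card_candidates → out = get_card_num_winners_alt card_winners card_candidates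
instance (card_winners : List Int) (card_candidates : List Int) (out : Int) : Decidable (Spec_get_card_num_winners card_winners card_candidates out) := by unfold Spec_get_card_num_winners; infer_instance

def pvDiffWitness_get_card_num_winners : List Int × List Int := ([2, 1], [1])
def pvDiffWitnessOut_get_card_num_winners : Int × Int := (0, 1)

-- ===== CLAIM (what is proved, stated in full; the proofs are below) =====
def Claim_unchanged_get_card_num_winners : Prop := ∀ (card_winners : List Int) (card_candidates : List Int), Dom_get_card_num_winners card_winners card_candidates → Spec_get_card_num_winners card_winners card_candidates (get_card_num_winners card_winners card_candidates)
def Claim_changed_get_card_num_winners : Prop := Dom_get_card_num_winners (pvDiffWitness_get_card_num_winners.1) (pvDiffWitness_get_card_num_winners.2) ∧ D_get_card_num_winners (pvDiffWitness_get_card_num_winners.1) (pvDiffWitness_get_card_num_winners.2) ∧ get_card_num_winners (pvDiffWitness_get_card_num_winners.1) (pvDiffWitness_get_card_num_winners.2) = pvDiffWitnessOut_get_card_num_winners.1 ∧ get_card_num_winners_alt (pvDiffWitness_get_card_num_winners.1) (pvDiffWitness_get_card_num_winners.2) = pvDiffWitnessOut_get_card_num_winners.2 ∧ pvDiffWitnessOut_get_card_num_winners.1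 ≠ pvDiffWitnessOut_get_card_num_winners.2
def Claim_exact_get_card_num_winners : Prop := ∀ (card_winners : List Int) (card_candidates : List Int), Dom_get_card_num_winners card_winners card_candidates → D_get_card_num_winners card_winners card_candidates → get_card_num_winners card_winners card_candidates ≠ get_card_num_winners_alt card_winners card_candidates

-- ===== LEMMAS AND PROOFS =====
-- B's table lookup is the plain multiplicity in the winners list
theorem pvCounts_getD (ws : List Int) (c : Int) :
    (ws.foldl (fun d w => d.insert w (d.getD w 0 + 1)) (PySem.Dict.empty : PySem.Dict Int Int)).getD c 0
      = (ws.count c : Int) := by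
  rw [PySem.Dict.foldl_insert_getD_add_one_eq_counter]
  exact PySem.Dict.getD_counter ws c

theorem hiddenTo_mem (ws : List Int) (c : Int) (h : hiddenTo ws c = true) : c ∈ ws := by
  induction ws with
  | nil => simp [hiddenTo] at h
  | cons w ws ih =>
    simp only [hiddenTo, Bool.or_eq_true, Bool.and_eq_true] at h
    rcases h with ⟨_, h2⟩ | h
    · exact List.mem_cons_of_mem _ (by simpa [List.contains_iff_mem] using h2)
    · exact List.mem_cons_of_mem _ (ih h)

-- A's inner scan never exceeds the multiplicity
theorem pvInnerA_le (ws : List Int) (c : Int) : pvInnerA ws c ≤ (ws.count c : Int) := by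
  induction ws with
  | nil => simp [pvInnerA]
  | cons w ws ih =>
    simp only [pvInnerA, List.count_cons]
    by_cases h1 : c < w
    · have h0 : (0 : Int) ≤ ws.count c := by positivity
      simp only [if_pos h1]; push_cast; omega
    · by_cases h2 : c = w
      · subst h2
        simp only [if_neg h1, beq_self_eq_true]
        push_cast; omega
      · have hbe : (c == w) = false := by simpa using h2
        have hwb : (w == c) = false := by simpa using (Ne.symm h2)
        simp [h1, hbe, hwb]
        omega

-- with no hidden occurrence, A's inner scan is exactly the multiplicity
theorem pvInnerA_eq_count (ws : List Int) (c : Int) (h : hiddenTo ws c = false) :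
    pvInnerA ws c = (ws.count c : Int) := by
  induction ws with
  | nil => simp [pvInnerA]
  | cons w ws ih =>
    simp only [hiddenTo, Bool.or_eq_false_iff, Bool.and_eq_false_iff] at h
    obtain ⟨h1, h2⟩ := h
    simp only [pvInnerA, List.count_cons]
    by_cases hlt : c < w
    · have hmem : c ∉ ws := by
        rcases h1 with h1 | h1
        · exfalso; simp at h1; omega
        · simpa [List.contains_iff_mem] using h1
      have hcnt : ws.count c = 0 := List.count_eq_zero.mpr hmem
      have hwb : (w == c) = false := by simp; omega
      simp [hlt, hcnt, hwb]
    · by_cases heq : c = w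
      · subst heq
        simp only [if_neg hlt, beq_self_eq_true, ih h2]
        push_cast; omega
      · have hbe : (c == w) = false := by simpa using heq
        have hwb : (w == c) = false := by simpa using (Ne.symm heq)
        simp [hlt, hbe, hwb, ih h2]

-- with a hidden occurrence, A's inner scan is strictly below the multiplicity
theorem pvInnerA_lt_count (ws : List Int) (c : Int) (h : hiddenTo ws c = true) :
    pvInnerA ws c < (ws.count c : Int) := by
  induction ws with
  | nil => simp [hiddenTo] at h
  | cons w ws ih =>
    simp only [hiddenTo, Bool.or_eq_true, Bool.and_eq_true] at h
    simp only [pvInnerA, List.count_cons]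
    rcases h with ⟨h1, h2⟩ | h
    · have hlt : c < w := by simpa using h1
      have hmem : c ∈ ws := by simpa [List.contains_iff_mem] using h2
      have hpos : 0 < ws.count c := List.count_pos_iff.mpr hmem
      simp only [if_pos hlt]; push_cast; omega
    · have hrec := ih h
      by_cases hlt : c < w
      · have hpos : 0 < ws.count c := List.count_pos_iff.mpr (hiddenTo_mem ws c h)
        simp only [if_pos hlt]; push_cast; omega
      · by_cases heq : c = w
        · subst heq
          simp only [if_neg hlt, beq_self_eq_true]
          push_cast at hrec ⊢; omega
        · have hbe : (c == w) = false := by simpa using heq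
          have hwb : (w == c) = false := by simpa using (Ne.symm heq)
          simp [hlt, hbe, hwb]; omega

-- the summing folds are the start value plus the sum of per-element terms
theorem pvFoldl_sum (cs : List Int) (f : Int → Int) (a : Int) :
    cs.foldl (fun s c => s + f c) a = a + (cs.map f).sum := by
  induction cs generalizing a with
  | nil => simp
  | cons c cs ih => simp [List.foldl_cons, ih]; ring

theorem pvSum_congr (cs : List Int) (f g : Int → Int) (h : ∀ c ∈ cs, f c = g c) :
    (cs.map f).sum = (cs.map g).sum := by
  induction cs with
  | nil => rfl
  | cons c cs ih =>
    simp only [List.map_cons, List.sum_cons, h c (List.mem_cons_self ..)]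
    rw [ih (fun x hx => h x (List.mem_cons_of_mem _ hx))]

theorem pvSum_le (cs : List Int) (f g : Int → Int) (h : ∀ c ∈ cs, f c ≤ g c) :
    (cs.map f).sum ≤ (cs.map g).sum := by
  induction cs with
  | nil => simp
  | cons c cs ih =>
    simp only [List.map_cons, List.sum_cons]
    have := h c (List.mem_cons_self ..)
    have := ih (fun x hx => h x (List.mem_cons_of_mem _ hx))
    omega

theorem pvSum_lt (cs : List Int) (f g : Int → Int) (hle : ∀ c ∈ cs, f c ≤ g c)
    (c₀ : Int) (hc₀ : c₀ ∈ cs) (hstrict : f c₀ < g c₀) :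
    (cs.map f).sum < (cs.map g).sum := by
  induction cs with
  | nil => cases hc₀
  | cons c cs ih =>
    simp only [List.map_cons, List.sum_cons]
    rcases List.mem_cons.mp hc₀ with rfl | hmem
    · have := pvSum_le cs f g (fun x hx => hle x (List.mem_cons_of_mem _ hx))
      omega
    · have := ih (fun x hx => hle x (List.mem_cons_of_mem _ hx)) hmem
      have := hle c (List.mem_cons_self ..)
      omega

-- ===== VERDICT (by name: the statement is the Claim_ definition above) =====
theorem get_card_num_winners_spec : Claim_unchanged_get_card_num_winners := by
  intro ws cs _ hD
  unfold get_card_num_winners get_card_num_winners_alt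
  rw [pvFoldl_sum, pvFoldl_sum]
  congr 1
  apply pvSum_congr
  intro c hc
  rw [pvCounts_getD, pvInnerA_eq_count]
  by_contra hh
  exact hD ⟨c, hc, by simpa using hh⟩

theorem get_card_num_winners_changed : Claim_changed_get_card_num_winners := by
  unfold Claim_changed_get_card_num_winners; decide

theorem get_card_num_winners_tight : Claim_exact_get_card_num_winners := by
  intro ws cs _ hd
  obtain ⟨c₀, hc₀, hhid⟩ := hd
  unfold get_card_num_winners get_card_num_winners_alt
  apply ne_of_lt
  rw [pvFoldl_sum, pvFoldl_sum]
  have := pvSum_lt cs (pvInnerA ws)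
    (fun c => ((ws.foldl (fun d w => d.insert w (d.getD w 0 + 1)) (PySem.Dict.empty : PySem.Dict Int Int)).getD c 0))
    (fun c _ => by simpa [pvCounts_getD] using pvInnerA_le ws c)
    c₀ hc₀ (by simpa [pvCounts_getD] using pvInnerA_lt_count ws c₀ hhid)
  omega
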